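-- pv_equiv track=rewrite | github.com/StewBagger/Jeeves | jeeves_modmanager.py | _remove_map_folders
-- ===== SOURCE A (Python) =====
-- def _get_ini_value(lines: list[str], key: str) -> list[str]:
--     """Extract semicolon-separated values for a key from INI lines.
--     Strips the b42 leading backslash from Mods= values."""
--     for line in lines:
--         stripped = line.strip()
--         if stripped.startswith(f"{key}="):
--             raw = stripped.split("=", 1)[1].strip()
--             values = [v.strip() for v in raw.split(";") if v.strip()]
--             if key == "Mods":
--                 values = [v.lstrip("\\") for v in values]
--             return values
--     return []
--
-- def _set_ini_value(lines: list[str], key: str, values: list[str]) -> list[str]: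
--     """Set a semicolon-separated value for a key in INI lines.
--     Adds the b42 leading backslash to Mods= values.
--     Preserves CRLF line endings."""
--     if key == "Mods":
--         formatted = [f"\\{v}" if not v.startswith("\\") else v for v in values]
--     else:
--         formatted = values
--     joined = ";".join(formatted)
--     found = False
--     new_lines = []
--     for line in lines:
--         if line.strip().startswith(f"{key}="):
--             new_lines.append(f"{key}={joined}\r\n")
--             found = True
--         else:
--             new_lines.append(line)
--     if not found:
--         new_lines.append(f"{key}={joined}\r\n")
--     return new_lines
--
-- def _remove_map_folders(lines: list[str], folders: list[str]) -> list[str]: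
--     """Remove map folder names from the Map= line."""
--     current_maps = _get_ini_value(lines, "Map")
--     changed = False
--     for folder in folders:
--         if folder in current_maps:
--             current_maps.remove(folder)
--             changed = True
--     if changed:
--         return _set_ini_value(lines, "Map", current_maps)
--     return lines
-- ===== SOURCE B (Python) =====
-- def _remove_map_folders(lines: list[str], folders: list[str]) -> list[str]:
--     """Remove map folder names from the Map= line (one occurrence per listed folder)."""
--     current = []
--     for line in lines:
--         s = line.strip()
--         if s.startswith("Map="):
--             raw = s.split("=", 1)[1].strip()
--             current = [v.strip() for v in raw.split(";") if v.strip()]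
--             break
--     budget = {}
--     for f in folders:
--         budget[f] = budget.get(f, 0) + 1
--     kept = []
--     changed = False
--     for m in current:
--         if budget.get(m, 0) > 0:
--             budget[m] -= 1
--             changed = True
--         else:
--             kept.append(m)
--     if not changed:
--         return lines
--     new_line = "Map=" + ";".join(kept) + "\r\n"
--     return [new_line if l.strip().startswith("Map=") else l for l in lines]
-- ===== Notes on version B (the rewrite author's own statement) =====
-- stated objective: alternative
-- what changed: B is self-contained: it scans once for the first Map= line and parses it inline, replaces A's per-folder membership test plus list.remove with a count-budget dict and a single filtering pass, and rewrites the Map= lines with one comprehension instead of A's generic _set_ini_value found-flag loop.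
import Mathlib
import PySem

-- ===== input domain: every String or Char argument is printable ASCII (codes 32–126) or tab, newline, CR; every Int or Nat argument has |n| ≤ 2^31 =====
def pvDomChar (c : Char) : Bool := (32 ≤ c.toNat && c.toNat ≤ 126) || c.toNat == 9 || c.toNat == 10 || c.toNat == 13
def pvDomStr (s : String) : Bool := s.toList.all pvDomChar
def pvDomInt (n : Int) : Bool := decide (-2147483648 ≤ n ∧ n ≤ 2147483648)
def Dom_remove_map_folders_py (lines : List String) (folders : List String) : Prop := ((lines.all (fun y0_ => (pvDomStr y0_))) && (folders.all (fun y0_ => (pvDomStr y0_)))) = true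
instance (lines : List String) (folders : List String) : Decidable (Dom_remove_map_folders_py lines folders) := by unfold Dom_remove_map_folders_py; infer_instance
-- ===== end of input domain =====

-- B is a self-contained rewrite: one scan for the first Map= line parsed inline, a count-budget
-- dict over folders with one filtering pass (instead of A's per-folder membership test plus
-- list.remove), and one comprehension rewriting the Map= lines (instead of A's generic
-- _get_ini_value/_set_ini_value helpers); equivalence of return values is proved
-- (neither program mutates its arguments).

-- ===== PORT A =====
-- A-side helper: port of _get_ini_value
def pvGetIniValue (lines : List String) (key : String) : List String :=
  match lines with
  | [] => []
  | line :: rest =>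
    let stripped := PySem.Str.strip line
    if PySem.Str.startswith stripped (key ++ "=") then
      -- stripped.split("=", 1)[1]: the startswith guard means "=" occurs, so index 1 exists; getD "" is unreachable
      let raw := PySem.Str.strip ((PySem.List.pyGet? ((PySem.Str.splitMax? stripped "=" 1).getD []) 1).getD "")
      let values := ((PySem.Str.split? raw ";").getD []).map PySem.Str.strip |>.filter (fun v => v ≠ "")
      if key == "Mods" then
        -- v.lstrip("\\"): exact hand port — drops the leading run of backslashes
        values.map (fun v => String.ofList (v.toList.dropWhile (· == '\\')))
      else values
    else pvGetIniValue rest key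

-- A-side helper: port of _set_ini_value
def pvSetIniValue (lines : List String) (key : String) (values : List String) : List String :=
  let formatted := if key == "Mods" then values.map (fun v => if ¬ PySem.Str.startswith v "\\" then "\\" ++ v else v) else values
  let joined := PySem.Str.join ";" formatted
  let r := lines.foldl (fun (s : List String × Bool) line =>
      if PySem.Str.startswith (PySem.Str.strip line) (key ++ "=") then (s.1 ++ [key ++ "=" ++ joined ++ "\r\n"], true)
      else (s.1 ++ [line], s.2)) ([], false)
  if ¬ r.2 then r.1 ++ [key ++ "=" ++ joined ++ "\r\n"] else r.1

def remove_map_folders_py (lines : List String) (folders : List String) : List String :=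
  let current_maps := pvGetIniValue lines "Map"
  let r := folders.foldl (fun (s : List String × Bool) folder =>
      if folder ∈ s.1 then ((PySem.List.remove? s.1 folder).getD s.1, true) else s) (current_maps, false)
  if r.2 then pvSetIniValue lines "Map" r.1 else lines

-- ===== PORT B =====
-- B parses the first Map= line itself (loop with break → structural recursion)
def pvFirstMaps : List String → List String
  | [] => []
  | line :: rest =>
    let s := PySem.Str.strip line
    if PySem.Str.startswith s "Map=" then
      let raw := PySem.Str.strip ((PySem.List.pyGet? ((PySem.Str.splitMax? s "=" 1).getD []) 1).getD "")
      ((PySem.Str.split? raw ";").getD []).map PySem.Str.strip |>.filter (fun v => v ≠ "")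
    else pvFirstMaps rest

def remove_map_folders_py_alt (lines : List String) (folders : List String) : List String :=
  let current := pvFirstMaps lines
  -- budget[f] = budget.get(f, 0) + 1
  let budget : PySem.Dict String Int := folders.foldl (fun d f => d.modify f 0 (· + 1)) PySem.Dict.empty
  let r := current.foldl (fun (s : PySem.Dict String Int × List String × Bool) m =>
      if s.1.getD m 0 > 0 then (s.1.insert m (s.1.getD m 0 - 1), s.2.1, true)
      else (s.1, s.2.1 ++ [m], s.2.2)) (budget, [], false)
  if ¬ r.2.2 then lines
  else
    let new_line := "Map=" ++ PySem.Str.join ";" r.2.1 ++ "\r\n"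
    lines.map (fun l => if PySem.Str.startswith (PySem.Str.strip l) "Map=" then new_line else l)

-- ===== PRECONDITION & SPEC =====
def Spec_remove_map_folders_py (lines : List String) (folders : List String) (out : List String) : Prop := out = remove_map_folders_py_alt lines folders
instance (lines : List String) (folders : List String) (out : List String) : Decidable (Spec_remove_map_folders_py lines folders out) := by unfold Spec_remove_map_folders_py; infer_instance

-- ===== CLAIM (what is proved, stated in full; the proofs are below) =====
def Claim_equal_remove_map_folders_py : Prop := ∀ (lines : List String) (folders : List String), Dom_remove_map_folders_py lines folders → Spec_remove_map_folders_py lines folders (remove_map_folders_py lines folders)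

-- ===== LEMMAS AND PROOFS =====

-- pvPurge ms c: drop each element of ms while its budget c is positive (the common meaning of both loops)
def pvPurge (ms : List String) (c : String → Nat) : List String :=
  match ms with
  | [] => []
  | m :: rest => if 0 < c m then pvPurge rest (fun y => if y = m then c y - 1 else c y) else m :: pvPurge rest c

def pvBump (c : String → Nat) (f : String) : String → Nat := fun y => if y = f then c y + 1 else c y

theorem pvKeyEq : ("Map" ++ "=" : String) = "Map=" := by decide

theorem pvFirstMaps_eq_get (lines : List String) : pvFirstMaps lines = pvGetIniValue lines "Map" := by
  induction lines with
  | nil => rfl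
  | cons line rest ih =>
    rw [pvFirstMaps.eq_def, pvGetIniValue.eq_def]
    simp only [pvKeyEq]
    split
    · rw [if_neg (by decide : ¬ (("Map" : String) == "Mods") = true)]
    · exact ih

theorem pvDecBump (c : String → Nat) (f m : String) (hmf : m ≠ f) :
    (fun y => if y = m then pvBump c f y - 1 else pvBump c f y)
      = pvBump (fun y => if y = m then c y - 1 else c y) f := by
  funext y
  by_cases h1 : y = m
  · subst h1
    have h2 : ¬ y = f := hmf
    simp [pvBump, h2]
  · by_cases h2 : y = f
    · subst h2
      simp [pvBump, h1]
    · simp [pvBump, h1, h2]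

theorem pvPurge_length_le (ms : List String) (c : String → Nat) : (pvPurge ms c).length ≤ ms.length := by
  induction ms generalizing c with
  | nil => simp [pvPurge]
  | cons m rest ih =>
    simp only [pvPurge]
    split
    · exact Nat.le_succ_of_le (ih _)
    · simpa using ih c

theorem pvPurge_zero (ms : List String) : pvPurge ms (fun _ => 0) = ms := by
  induction ms with
  | nil => rfl
  | cons m rest ih => simpa [pvPurge] using ih

theorem pvPurge_bump_not_mem (ms : List String) (c : String → Nat) (f : String) (h : f ∉ ms) :
    pvPurge ms (pvBump c f) = pvPurge ms c := by
  induction ms generalizing c with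
  | nil => rfl
  | cons m rest ih =>
    have hmf : m ≠ f := fun he => h (he ▸ List.mem_cons_self)
    have hrest : f ∉ rest := fun hr => h (List.mem_cons_of_mem _ hr)
    simp only [pvPurge, pvBump, if_neg hmf]
    split
    · rw [show (fun y => if y = m then (if y = f then c y + 1 else c y) - 1 else if y = f then c y + 1 else c y)
           = pvBump (fun y => if y = m then c y - 1 else c y) f from by
          simpa [pvBump] using pvDecBump c f m hmf]
      exact ih _ hrest
    · rw [ih c hrest]

theorem pvPurge_bump_erase (ms : List String) (c : String → Nat) (f : String) (h : f ∈ ms) :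
    pvPurge ms (pvBump c f) = pvPurge (ms.erase f) c := by
  induction ms generalizing c with
  | nil => cases h
  | cons m rest ih =>
    by_cases hmf : m = f
    · subst hmf
      have hpos : 0 < pvBump c m m := by simp [pvBump]
      have hdec : (fun y => if y = m then pvBump c m y - 1 else pvBump c m y) = c := by
        funext y; by_cases h1 : y = m <;> simp [pvBump, h1]
      simp only [pvPurge, if_pos hpos, hdec, List.erase_cons_head]
    · have hrest : f ∈ rest := by
        rcases List.mem_cons.mp h with h1 | h1
        · exact absurd h1.symm hmf
        · exact h1
      have herase : (m :: rest).erase f = m :: rest.erase f := by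
        rw [List.erase_cons_tail]
        simp [hmf]
      have hb : pvBump c f m = c m := by simp [pvBump, hmf]
      rw [herase]
      simp only [pvPurge, hb]
      split
      · rw [show (fun y => if y = m then (pvBump c f) y - 1 else (pvBump c f) y)
             = pvBump (fun y => if y = m then c y - 1 else c y) f from pvDecBump c f m hmf]
        exact ih _ hrest
      · rw [ih c hrest]

theorem pvCnt_cons (f : String) (rest : List String) :
    (fun x => List.count x (f :: rest)) = pvBump (fun x => List.count x rest) f := by
  funext x
  by_cases hx : x = f
  · subst hx; simp [pvBump]
  · have hfx : ¬ f = x := fun h => hx h.symm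
    simp [pvBump, hx, hfx]

-- A's loop computes pvPurge with the count of folders as budget, and its flag is "the list shrank"
theorem pvA_char (fs : List String) (ms : List String) (ch : Bool) :
    fs.foldl (fun (s : List String × Bool) folder =>
        if folder ∈ s.1 then ((PySem.List.remove? s.1 folder).getD s.1, true) else s) (ms, ch)
      = (pvPurge ms (fun x => List.count x fs),
         ch || decide ((pvPurge ms (fun x => List.count x fs)).length < ms.length)) := by
  induction fs generalizing ms ch with
  | nil => simp [List.count_nil, pvPurge_zero]
  | cons f rest ih =>
    rw [pvCnt_cons]
    simp only [List.foldl_cons]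
    by_cases hf : f ∈ ms
    · rw [if_pos hf, PySem.List.remove?_eq_some_erase ms f hf]
      simp only [Option.getD_some]
      rw [ih]
      rw [pvPurge_bump_erase ms _ f hf]
      have hlt : (pvPurge (ms.erase f) fun x => List.count x rest).length < ms.length := by
        have h1 := pvPurge_length_le (ms.erase f) (fun x => List.count x rest)
        have h2 : (ms.erase f).length < ms.length := by
          rw [List.length_erase_of_mem hf]
          have : 0 < ms.length := List.length_pos_of_mem hf
          omega
        omega
      simp [hlt]
    · rw [if_neg hf, ih, pvPurge_bump_not_mem ms _ f hf]

-- B's budget loop computes pvPurge too, and its flag is the same "the list shrank"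
theorem pvB_char (ms : List String) (d : PySem.Dict String Int) (c : String → Nat)
    (hd : ∀ x, d.getD x 0 = (c x : Int)) (acc : List String) (ch : Bool) :
    (ms.foldl (fun (s : PySem.Dict String Int × List String × Bool) m =>
        if s.1.getD m 0 > 0 then (s.1.insert m (s.1.getD m 0 - 1), s.2.1, true)
        else (s.1, s.2.1 ++ [m], s.2.2)) (d, acc, ch)).2
      = (acc ++ pvPurge ms c, ch || decide ((pvPurge ms c).length < ms.length)) := by
  induction ms generalizing d c acc ch with
  | nil => simp [pvPurge]
  | cons m rest ih =>
    simp only [List.foldl_cons]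
    by_cases hpos : 0 < c m
    · have hdpos : d.getD m 0 > 0 := by rw [hd m]; exact_mod_cast hpos
      rw [if_pos hdpos]
      have hd' : ∀ x, (d.insert m (d.getD m 0 - 1)).getD x 0
          = ((fun y => if y = m then c y - 1 else c y) x : Int) := by
        intro x
        rw [PySem.Dict.getD_insert]
        by_cases hx : x = m
        · subst hx; rw [if_pos rfl, hd x]; simp; omega
        · rw [if_neg hx, hd x]; simp [hx]
      rw [ih _ _ hd' acc true]
      have h2 : (pvPurge rest (fun y => if y = m then c y - 1 else c y)).length < (m :: rest).length := by
        have := pvPurge_length_le rest (fun y => if y = m then c y - 1 else c y)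
        simp only [List.length_cons]; omega
      simp [pvPurge, hpos]
      exact Or.inr (Nat.lt_succ_iff.mp (by simpa using h2))
    · have hc0 : c m = 0 := by omega
      have hdpos : ¬ d.getD m 0 > 0 := by rw [hd m]; simp [hc0]
      rw [if_neg hdpos, ih _ _ hd (acc ++ [m]) ch]
      simp only [pvPurge, if_neg hpos]
      rw [show decide ((pvPurge rest c).length < rest.length)
            = decide ((m :: pvPurge rest c).length < (m :: rest).length) from by
          simp]
      simp [List.append_assoc]

theorem pvCounter_getD (fs : List String) (x : String) :
    (fs.foldl (fun d folder => d.modify folder 0 (· + 1)) (PySem.Dict.empty : PySem.Dict String Int)).getD x 0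
      = ((List.count x fs : Nat) : Int) := by
  have h := PySem.Dict.getD_counter fs x
  simpa [PySem.Dict.counter_eq_foldl] using h

-- _set_ini_value's loop = a map plus an any-flag
theorem pvSetFold (lines : List String) (repl : String) (acc : List String) (b : Bool) :
    lines.foldl (fun (s : List String × Bool) line =>
        if PySem.Str.startswith (PySem.Str.strip line) ("Map" ++ "=") then (s.1 ++ [repl], true)
        else (s.1 ++ [line], s.2)) (acc, b)
      = (acc ++ lines.map (fun l => if PySem.Str.startswith (PySem.Str.strip l) ("Map" ++ "=") then repl else l),
         b || lines.any (fun l => PySem.Str.startswith (PySem.Str.strip l) ("Map" ++ "="))) := by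
  induction lines generalizing acc b with
  | nil => simp
  | cons line rest ih =>
    rw [List.foldl_cons, List.map_cons, List.any_cons]
    by_cases h : PySem.Str.startswith (PySem.Str.strip line) ("Map" ++ "=") = true
    · rw [if_pos h, ih, if_pos h, h]
      simp [List.append_assoc]
    · rw [if_neg h, ih, if_neg h]
      rw [Bool.not_eq_true] at h
      rw [h]
      simp [List.append_assoc]

-- a nonempty _get_ini_value result means some line matches
theorem pvGet_ne_nil_any (lines : List String) (h : pvGetIniValue lines "Map" ≠ []) :
    lines.any (fun l => PySem.Str.startswith (PySem.Str.strip l) ("Map" ++ "=")) = true := by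
  induction lines with
  | nil => exact absurd rfl h
  | cons line rest ih =>
    rw [List.any_cons]
    by_cases hm : PySem.Str.startswith (PySem.Str.strip line) ("Map" ++ "=") = true
    · rw [hm, Bool.true_or]
    · have hstep : pvGetIniValue (line :: rest) "Map" = pvGetIniValue rest "Map" := by
        rw [pvGetIniValue.eq_def]
        simp only [if_neg hm]
      rw [hstep] at h
      rw [ih h, Bool.or_true]

-- when some line matches, _set_ini_value is exactly B's comprehension
theorem pvSet_eq_map (lines kept : List String)
    (hany : lines.any (fun l => PySem.Str.startswith (PySem.Str.strip l) ("Map" ++ "=")) = true) :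
    pvSetIniValue lines "Map" kept
      = lines.map (fun l => if PySem.Str.startswith (PySem.Str.strip l) "Map=" then "Map=" ++ PySem.Str.join ";" kept ++ "\r\n" else l) := by
  simp only [pvSetIniValue]
  rw [if_neg (by decide : ¬ (("Map" : String) == "Mods") = true)]
  rw [pvSetFold]
  simp only [hany, Bool.false_or, List.nil_append]
  rw [if_neg (by simp)]
  rw [pvKeyEq]

-- ===== VERDICT (by name: the statement is the Claim_ definition above) =====
theorem remove_map_folders_py_spec : Claim_equal_remove_map_folders_py := by
  intro lines folders _
  unfold Spec_remove_map_folders_py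
  simp only [remove_map_folders_py, remove_map_folders_py_alt, pvFirstMaps_eq_get]
  rw [pvA_char folders (pvGetIniValue lines "Map") false]
  rw [pvB_char (pvGetIniValue lines "Map") _ (fun x => List.count x folders)
      (fun x => pvCounter_getD folders x) [] false]
  simp only [Bool.false_or, List.nil_append]
  set ms := pvGetIniValue lines "Map" with hms
  set kept := pvPurge ms (fun x => List.count x folders) with hkept
  by_cases hch : kept.length < ms.length
  · rw [decide_eq_true hch, if_pos rfl, if_neg (by simp)]
    have hne : ms ≠ [] := by
      intro h0
      rw [hkept, h0] at hch
      simp [pvPurge] at hch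
    have hany := pvGet_ne_nil_any lines (by rw [← hms]; exact hne)
    exact pvSet_eq_map lines kept hany
  · simp [hch]
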